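-- pv_equiv track=rewrite | github.com/alexvasiu/ExamenFP | User Interface - Lists/main.py | subsecventa_munte
-- ===== SOURCE A (Python) =====
-- def subsecventa_munte(lista):
--     """
--     Functia primeste prin parametru lista, o lista de numere intregi
--     Functia returneaza subsecventa de lungime maxima unde subsecventa este de tip munte
--     Daca nu exita o astfel de subsecventa, functia va returna o lista vida
--     Daca exista mai multe subsecvente de acest tip, functia o va returna pe prima gasita
--     """
--     length = len(lista)
--     subMaxima = []
--     for start in range(0, length):
--         sfarsit = length - 1
--         while sfarsit > start:
--             index = start
--             goUp = False
--             while index + 1 <= sfarsit and lista[index] < lista[index + 1]: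
--                 index += 1
--                 goUp = True
--             goDown = False
--             while index + 1 <= sfarsit and lista[index] > lista[index + 1]:
--                 index += 1
--                 goDown = True
--             if goDown and goUp and index == sfarsit and sfarsit - start + 1 > len(subMaxima):
--                 subMaxima = lista[start:sfarsit + 1]
--             sfarsit -= 1
--     return subMaxima
-- ===== SOURCE B (Python) =====
-- def subsecventa_munte(lista):
--     """Same result as A: for each start walk the maximal strict ascent then
--     strict descent ONCE and compare that single candidate, instead of
--     re-walking for every possible end index."""
--     n = len(lista)
--     best = []
--     start = 0
--     while start < n:
--         i = start
--         while i + 1 < n and lista[i] < lista[i + 1]: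
--             i += 1
--         peak = i
--         while i + 1 < n and lista[i] > lista[i + 1]:
--             i += 1
--         if peak > start and i > peak and i - start + 1 > len(best):
--             best = lista[start:i + 1]
--         start += 1
--     return best
-- ===== Notes on version B (the rewrite author's own statement) =====
-- stated objective: faster
-- what changed: Instead of re-walking the ascent/descent for every candidate end index (descending inner loop over sfarsit), B walks the maximal strict ascent then strict descent once per start and compares that single longest candidate, which is sufficient because shorter ends from the same start can never beat it.
import Mathlib
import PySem

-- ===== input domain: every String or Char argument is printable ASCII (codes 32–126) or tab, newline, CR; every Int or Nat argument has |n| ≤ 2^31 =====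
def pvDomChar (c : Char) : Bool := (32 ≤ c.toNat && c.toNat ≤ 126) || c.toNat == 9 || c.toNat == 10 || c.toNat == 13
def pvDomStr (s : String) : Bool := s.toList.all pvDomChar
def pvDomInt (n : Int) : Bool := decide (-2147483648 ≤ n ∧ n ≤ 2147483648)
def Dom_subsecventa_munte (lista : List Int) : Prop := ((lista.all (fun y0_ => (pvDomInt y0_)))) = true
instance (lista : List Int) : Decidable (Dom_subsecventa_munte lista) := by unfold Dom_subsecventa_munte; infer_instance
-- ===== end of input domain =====

-- B walks the maximal strict ascent then strict descent once per start instead of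
-- re-walking for every candidate end index: O(n^2) instead of O(n^3) (objective: faster).
-- Indexing lista[index] in both programs is always in range, so List.getD is exact there.

-- ===== PORT A =====
-- inner 'while index + 1 <= sfarsit and lista[index] < lista[index + 1]' loop
def upA (lista : List Int) (sfarsit index : Nat) (goUp : Bool) : Nat × Bool :=
  if h : index + 1 ≤ sfarsit ∧ lista.getD index 0 < lista.getD (index + 1) 0 then
    upA lista sfarsit (index + 1) true
  else (index, goUp)
termination_by sfarsit - index
decreasing_by omega

-- inner 'while index + 1 <= sfarsit and lista[index] > lista[index + 1]' loop
def downA (lista : List Int) (sfarsit index : Nat) (goDown : Bool) : Nat × Bool :=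
  if h : index + 1 ≤ sfarsit ∧ lista.getD index 0 > lista.getD (index + 1) 0 then
    downA lista sfarsit (index + 1) true
  else (index, goDown)
termination_by sfarsit - index
decreasing_by omega

-- the 'while sfarsit > start' loop (sfarsit descends)
def innerA (lista : List Int) (start : Nat) (subMaxima : List Int) (sfarsit : Nat) : List Int :=
  if h : sfarsit > start then
    let r1 := upA lista sfarsit start false
    let r2 := downA lista sfarsit r1.1 false
    let subMaxima' :=
      if r2.2 = true ∧ r1.2 = true ∧ r2.1 = sfarsit ∧ sfarsit - start + 1 > subMaxima.length then
        PySem.List.slice lista (some (start : Int)) (some ((sfarsit : Int) + 1))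
      else subMaxima
    innerA lista start subMaxima' (sfarsit - 1)
  else subMaxima
termination_by sfarsit
decreasing_by omega

def subsecventa_munte (lista : List Int) : List Int :=
  (List.range lista.length).foldl
    (fun subMaxima start => innerA lista start subMaxima (lista.length - 1)) []

-- ===== PORT B =====
-- 'while i + 1 < n and lista[i] < lista[i + 1]'
def walkUp (lista : List Int) (i : Nat) : Nat :=
  if h : i + 1 < lista.length ∧ lista.getD i 0 < lista.getD (i + 1) 0 then
    walkUp lista (i + 1)
  else i
termination_by lista.length - i
decreasing_by omega

-- 'while i + 1 < n and lista[i] > lista[i + 1]'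
def walkDown (lista : List Int) (i : Nat) : Nat :=
  if h : i + 1 < lista.length ∧ lista.getD i 0 > lista.getD (i + 1) 0 then
    walkDown lista (i + 1)
  else i
termination_by lista.length - i
decreasing_by omega

-- 'while start < n' loop of B
def goB (lista : List Int) (start : Nat) (best : List Int) : List Int :=
  if h : start < lista.length then
    let peak := walkUp lista start
    let i := walkDown lista peak
    let best' :=
      if peak > start ∧ i > peak ∧ i - start + 1 > best.length then
        PySem.List.slice lista (some (start : Int)) (some ((i : Int) + 1))
      else best
    goB lista (start + 1) best'
  else best
termination_by lista.length - start
decreasing_by omega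

def subsecventa_munte_alt (lista : List Int) : List Int := goB lista 0 []

-- ===== PRECONDITION & SPEC =====
def Spec_subsecventa_munte (lista : List Int) (out : List Int) : Prop := out = subsecventa_munte_alt lista
instance (lista : List Int) (out : List Int) : Decidable (Spec_subsecventa_munte lista out) := by unfold Spec_subsecventa_munte; infer_instance

-- ===== CLAIM (what is proved, stated in full; the proofs are below) =====
def Claim_equal_subsecventa_munte : Prop := ∀ (lista : List Int), Dom_subsecventa_munte lista → Spec_subsecventa_munte lista (subsecventa_munte lista)

-- ===== LEMMAS AND PROOFS =====

theorem walkUp_ge (lista : List Int) (i : Nat) : i ≤ walkUp lista i := by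
  fun_induction walkUp lista i with
  | case1 i h ih => omega
  | case2 i h => omega

theorem walkUp_lt (lista : List Int) (i : Nat) (h : i < lista.length) :
    walkUp lista i < lista.length := by
  fun_induction walkUp lista i with
  | case1 i h ih => exact ih (by omega)
  | case2 i h' => omega

theorem walkDown_ge (lista : List Int) (i : Nat) : i ≤ walkDown lista i := by
  fun_induction walkDown lista i with
  | case1 i h ih => omega
  | case2 i h => omega

theorem walkDown_lt (lista : List Int) (i : Nat) (h : i < lista.length) :
    walkDown lista i < lista.length := by
  fun_induction walkDown lista i with
  | case1 i h ih => exact ih (by omega)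
  | case2 i h' => omega

theorem upA_fst (lista : List Int) (s i : Nat) (g : Bool) :
    i ≤ s → s < lista.length → (upA lista s i g).1 = min (walkUp lista i) s := by
  fun_induction upA lista s i g with
  | case1 i g h ih =>
      intro his hsn
      rw [walkUp, dif_pos ⟨by omega, h.2⟩]
      exact ih (by omega) hsn
  | case2 i g h =>
      intro his hsn
      rcases Nat.lt_or_ge i s with hi | hi
      · rw [walkUp, dif_neg]
        · omega
        · rintro ⟨h1, h2⟩; exact h ⟨by omega, h2⟩
      · have := walkUp_ge lista i; omega

theorem upA_ge (lista : List Int) (s : Nat) :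
    ∀ i g, i ≤ (upA lista s i g).1 := by
  intro i g
  fun_induction upA lista s i g with
  | case1 i g h ih => omega
  | case2 i g h => omega

theorem upA_snd (lista : List Int) (s : Nat) :
    ∀ i g, (upA lista s i g).2 = (g || decide (i < (upA lista s i g).1)) := by
  intro i g
  fun_induction upA lista s i g with
  | case1 i g h ih =>
      have h1 := upA_ge lista s (i + 1) true
      rw [ih]
      simp
      omega
  | case2 i g h => simp

theorem downA_fst (lista : List Int) (s i : Nat) (g : Bool) :
    i ≤ s → s < lista.length → (downA lista s i g).1 = min (walkDown lista i) s := by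
  fun_induction downA lista s i g with
  | case1 i g h ih =>
      intro his hsn
      rw [walkDown, dif_pos ⟨by omega, h.2⟩]
      exact ih (by omega) hsn
  | case2 i g h =>
      intro his hsn
      rcases Nat.lt_or_ge i s with hi | hi
      · rw [walkDown, dif_neg]
        · omega
        · rintro ⟨h1, h2⟩; exact h ⟨by omega, h2⟩
      · have := walkDown_ge lista i; omega

theorem downA_ge (lista : List Int) (s : Nat) :
    ∀ i g, i ≤ (downA lista s i g).1 := by
  intro i g
  fun_induction downA lista s i g with
  | case1 i g h ih => omega
  | case2 i g h => omega

theorem downA_snd (lista : List Int) (s : Nat) :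
    ∀ i g, (downA lista s i g).2 = (g || decide (i < (downA lista s i g).1)) := by
  intro i g
  fun_induction downA lista s i g with
  | case1 i g h ih =>
      have h1 := downA_ge lista s (i + 1) true
      rw [ih]
      simp
      omega
  | case2 i g h => simp

theorem slice_succ_eq (lista : List Int) (a b : Nat) :
    PySem.List.slice lista (some (a : Int)) (some ((b : Int) + 1)) =
      (lista.drop a).take (b + 1 - a) := by
  have : ((b : Int) + 1) = ((b + 1 : Nat) : Int) := by push_cast; ring
  rw [this, PySem.List.slice_natCast]

-- the inner descending sfarsit-loop of A equals B's single longest candidate check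
theorem innerA_eq (lista : List Int) (start : Nat) (best : List Int) (s : Nat) :
    s < lista.length →
      innerA lista start best s =
        (if start < walkUp lista start ∧
            walkUp lista start < min (walkDown lista (walkUp lista start)) s ∧
            best.length < min (walkDown lista (walkUp lista start)) s - start + 1 then
          (lista.drop start).take (min (walkDown lista (walkUp lista start)) s + 1 - start)
        else best) := by
  fun_induction innerA lista start best s with
  | case1 best sfarsit h r1 r2 subMaxima' ih =>
      intro hsn
      have e1 : r1 = upA lista sfarsit start false := rfl
      have e2 : r2 = downA lista sfarsit r1.1 false := rfl
      have esub : subMaxima' =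
          if r2.2 = true ∧ r1.2 = true ∧ r2.1 = sfarsit ∧
              sfarsit - start + 1 > best.length then
            PySem.List.slice lista (some (start : Int)) (some ((sfarsit : Int) + 1))
          else best := rfl
      have hstart : start < lista.length := by omega
      have hP : start ≤ walkUp lista start := walkUp_ge lista start
      have hPn : walkUp lista start < lista.length := walkUp_lt lista start hstart
      have hE : walkUp lista start ≤ walkDown lista (walkUp lista start) :=
        walkDown_ge lista (walkUp lista start)
      have hEn : walkDown lista (walkUp lista start) < lista.length :=
        walkDown_lt lista (walkUp lista start) hPn
      set P := walkUp lista start with hPdef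
      set E := walkDown lista P with hEdef
      have h1f : (upA lista sfarsit start false).1 = min P sfarsit :=
        upA_fst lista sfarsit start false (by omega) hsn
      have h1s : (upA lista sfarsit start false).2 = decide (start < min P sfarsit) := by
        rw [upA_snd, h1f]; simp
      have h2f : (downA lista sfarsit (upA lista sfarsit start false).1 false).1
          = min (walkDown lista (upA lista sfarsit start false).1) sfarsit := by
        refine downA_fst lista sfarsit _ false ?_ hsn
        rw [h1f]; omega
      have h2s : (downA lista sfarsit (upA lista sfarsit start false).1 false).2
          = decide ((upA lista sfarsit start false).1
              < min (walkDown lista (upA lista sfarsit start false).1) sfarsit) := by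
        rw [downA_snd, h2f]; simp
      rcases Nat.lt_or_ge P sfarsit with hPs | hPs
      · -- the ascent is not cut off by sfarsit: index reaches P, then descends
        have hmin1 : min P sfarsit = P := by omega
        have hcond : (r2.2 = true ∧ r1.2 = true ∧ r2.1 = sfarsit ∧
            sfarsit - start + 1 > best.length) ↔
            (start < P ∧ sfarsit ≤ E ∧ best.length < sfarsit - start + 1) := by
          rw [e2, e1, h2s, h2f, h1s, h1f, hmin1, ← hEdef]
          simp only [decide_eq_true_eq]
          omega
        by_cases hc : start < P ∧ sfarsit ≤ E ∧ best.length < sfarsit - start + 1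
        · -- A updates here with the longest candidate from this start
          have hsub : subMaxima' = (lista.drop start).take (sfarsit + 1 - start) := by
            rw [esub, if_pos (hcond.mpr hc), slice_succ_eq]
          have hlen : ((lista.drop start).take (sfarsit + 1 - start)).length
              = sfarsit + 1 - start := by
            simp [List.length_take, List.length_drop]; omega
          rw [ih (by omega), hsub,
            show min E (sfarsit - 1) = sfarsit - 1 from by omega,
            show min E sfarsit = sfarsit from by omega,
            if_neg (by rintro ⟨-, -, h3⟩; rw [hlen] at h3; omega),
            if_pos ⟨hc.1, by omega, by omega⟩]
        · -- no update at this sfarsit; neither side changes best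
          have hsub : subMaxima' = best := by
            rw [esub, if_neg (fun hx => hc (hcond.mp hx))]
          rw [ih (by omega), hsub]
          by_cases hq : sfarsit ≤ E
          · rw [show min E (sfarsit - 1) = sfarsit - 1 from by omega,
              show min E sfarsit = sfarsit from by omega,
              if_neg (by rintro ⟨q1, q2, q3⟩; exact hc ⟨q1, hq, by omega⟩),
              if_neg (by rintro ⟨q1, q2, q3⟩; exact hc ⟨q1, hq, by omega⟩)]
          · rw [show min E (sfarsit - 1) = E from by omega,
              show min E sfarsit = E from by omega]
      · -- sfarsit lies inside the ascent: index stops at sfarsit, goDown stays False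
        have hmin1 : min P sfarsit = sfarsit := by omega
        have hwd : sfarsit ≤ walkDown lista sfarsit := walkDown_ge lista sfarsit
        have hcondF : ¬(r2.2 = true ∧ r1.2 = true ∧ r2.1 = sfarsit ∧
            sfarsit - start + 1 > best.length) := by
          rw [e2, e1, h2s, h2f, h1s, h1f, hmin1]
          simp only [decide_eq_true_eq]
          omega
        have hsub : subMaxima' = best := by rw [esub, if_neg hcondF]
        rw [ih (by omega), hsub,
          if_neg (by rintro ⟨q1, q2, q3⟩; omega),
          if_neg (by rintro ⟨q1, q2, q3⟩; omega)]
  | case2 best sfarsit h =>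
      intro hsn
      rw [if_neg]
      rintro ⟨q1, q2, q3⟩
      have := walkUp_ge lista start
      omega

theorem goB_eq (lista : List Int) :
    ∀ s best, goB lista s best =
      (List.range' s (lista.length - s)).foldl
        (fun b st =>
          if walkUp lista st > st ∧ walkDown lista (walkUp lista st) > walkUp lista st ∧
              walkDown lista (walkUp lista st) - st + 1 > b.length then
            PySem.List.slice lista (some (st : Int)) (some ((walkDown lista (walkUp lista st) : Int) + 1))
          else b) best := by
  intro s best
  fun_induction goB lista s best with
  | case1 s best h peak i best' ih =>
      rw [show lista.length - s = (lista.length - (s + 1)) + 1 from by omega,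
        List.range'_succ, List.foldl_cons]
      exact ih
  | case2 s best h =>
      rw [Nat.sub_eq_zero_of_le (by omega)]
      simp

-- ===== VERDICT (by name: the statement is the Claim_ definition above) =====
theorem subsecventa_munte_spec : Claim_equal_subsecventa_munte := by
  intro lista _
  show subsecventa_munte lista = subsecventa_munte_alt lista
  unfold subsecventa_munte subsecventa_munte_alt
  rw [goB_eq, Nat.sub_zero, ← List.range_eq_range']
  apply PySem.List.foldl_congr_mem
  intro b st hst
  have hstn : st < lista.length := List.mem_range.mp hst
  have hPn : walkUp lista st < lista.length := walkUp_lt lista st hstn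
  have hEn : walkDown lista (walkUp lista st) < lista.length :=
    walkDown_lt lista (walkUp lista st) hPn
  rw [innerA_eq lista st b (lista.length - 1) (by omega),
    show min (walkDown lista (walkUp lista st)) (lista.length - 1)
      = walkDown lista (walkUp lista st) from by omega,
    slice_succ_eq]
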